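-- pv_equiv track=rewrite | github.com/korkorran/silex-app | api/cube_solver.py | compter_poches
-- ===== SOURCE A (Python) =====
-- def dfs(matrice, x, y, z, visite):
--     # Vérifier si la position est dans la matrice et si le point n'a pas été visité et est un zéro
--     if (0 <= x < len(matrice) and 0 <= y < len(matrice[0]) and 0 <= z < len(matrice[0][0])
--             and not visite[x][y][z] and matrice[x][y][z] == 0):
--         visite[x][y][z] = True  # Marquer comme visité
--
--         # Appeler récursivement dfs sur tous les voisins adjacents
--         dfs(matrice, x + 1, y, z, visite)
--         dfs(matrice, x - 1, y, z, visite)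
--         dfs(matrice, x, y + 1, z, visite)
--         dfs(matrice, x, y - 1, z, visite)
--         dfs(matrice, x, y, z + 1, visite)
--         dfs(matrice, x, y, z - 1, visite)
--
-- def compter_poches(matrice):
--     visite = [[[False for _ in range(len(matrice[0][0]))] for _ in range(len(matrice[0]))] for _ in range(len(matrice))]
--     nombre_poches = 0
--
--     for x in range(len(matrice)):
--         for y in range(len(matrice[0])):
--             for z in range(len(matrice[0][0])):
--                 if matrice[x][y][z] == 0 and not visite[x][y][z]:
--                     dfs(matrice, x, y, z, visite)
--                     nombre_poches += 1  # Une nouvelle poche trouvée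
--
--     return nombre_poches
-- ===== SOURCE B (Python) =====
-- def compter_poches(matrice):
--     visite = [[[False] * len(matrice[0][0]) for _ in range(len(matrice[0]))] for _ in range(len(matrice))]
--     nombre_poches = 0
--     for x in range(len(matrice)):
--         for y in range(len(matrice[0])):
--             for z in range(len(matrice[0][0])):
--                 if matrice[x][y][z] == 0 and not visite[x][y][z]:
--                     nombre_poches += 1
--                     # iterative flood fill with an explicit stack instead of recursion
--                     pile = [(x, y, z)]
--                     while pile:
--                         cx, cy, cz = pile.pop()
--                         if (0 <= cx < len(matrice) and 0 <= cy < len(matrice[0])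
--                                 and 0 <= cz < len(matrice[0][0])
--                                 and not visite[cx][cy][cz] and matrice[cx][cy][cz] == 0):
--                             visite[cx][cy][cz] = True
--                             pile.extend([(cx, cy, cz - 1), (cx, cy, cz + 1),
--                                          (cx, cy - 1, cz), (cx, cy + 1, cz),
--                                          (cx - 1, cy, cz), (cx + 1, cy, cz)])
--     return nombre_poches
-- ===== Notes on version B (the rewrite author's own statement) =====
-- stated objective: simpler
-- what changed: The recursive six-way DFS helper is replaced by an iterative flood fill driven by an explicit stack inside the scan loop, so no recursion (and no Python call-stack depth proportional to pocket size) is needed.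
import Mathlib
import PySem

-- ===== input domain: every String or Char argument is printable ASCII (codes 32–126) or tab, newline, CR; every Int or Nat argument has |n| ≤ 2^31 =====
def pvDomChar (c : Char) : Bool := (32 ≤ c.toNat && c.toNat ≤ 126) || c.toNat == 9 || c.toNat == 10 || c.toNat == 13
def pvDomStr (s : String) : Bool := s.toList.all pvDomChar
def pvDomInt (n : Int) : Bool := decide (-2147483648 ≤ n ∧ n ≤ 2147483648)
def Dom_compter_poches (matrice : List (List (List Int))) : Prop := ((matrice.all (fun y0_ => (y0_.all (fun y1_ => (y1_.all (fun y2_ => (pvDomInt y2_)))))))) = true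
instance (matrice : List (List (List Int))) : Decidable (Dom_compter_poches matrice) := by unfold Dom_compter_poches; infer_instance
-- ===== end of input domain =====

-- B replaces A's recursive six-way DFS by an iterative flood fill with an explicit stack (objective: simpler).

-- ===== PORT A =====
-- shared helpers: nested-list reads/writes with Python index semantics; the `.getD` defaults are
-- only ever returned where the Python guard has already ruled the access out (short-circuit `and`)
def vGet (v : List (List (List Bool))) (x y z : Int) : Bool :=
  (PySem.List.pyGet? (PySem.List.pyGet? ((PySem.List.pyGet? v x).getD []) y |>.getD []) z).getD true

def mGet (m : List (List (List Int))) (x y z : Int) : Int :=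
  (PySem.List.pyGet? (PySem.List.pyGet? ((PySem.List.pyGet? m x).getD []) y |>.getD []) z).getD 1

def vSet (v : List (List (List Bool))) (x y z : Int) : List (List (List Bool)) :=
  let p := (PySem.List.pyGet? v x).getD []
  let r := (PySem.List.pyGet? p y).getD []
  v.set x.toNat (p.set y.toNat (r.set z.toNat true))

def dimY (m : List (List (List Int))) : Int := ((m.headD []).length : Int)
def dimZ (m : List (List (List Int))) : Int := (((m.headD []).headD []).length : Int)

-- the guard of A's dfs (identical condition in B's while-loop body)
def pocheOk (m : List (List (List Int))) (v : List (List (List Bool))) (x y z : Int) : Bool :=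
  decide (0 ≤ x) && decide (x < (m.length : Int)) && decide (0 ≤ y) && decide (y < dimY m)
    && decide (0 ≤ z) && decide (z < dimZ m) && !(vGet v x y z) && (mGet m x y z == 0)

-- A's recursive dfs; the Nat argument is fuel only (compter_poches passes enough for full recursion)
def dfs (m : List (List (List Int))) :
    Nat → Int → Int → Int → List (List (List Bool)) → List (List (List Bool))
  | 0, _, _, _, v => v
  | f + 1, x, y, z, v =>
    if pocheOk m v x y z then
      let v0 := vSet v x y z
      let v1 := dfs m f (x + 1) y z v0
      let v2 := dfs m f (x - 1) y z v1
      let v3 := dfs m f x (y + 1) z v2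
      let v4 := dfs m f x (y - 1) z v3
      let v5 := dfs m f x y (z + 1) v4
      dfs m f x y (z - 1) v5
    else v

def compter_poches (matrice : List (List (List Int))) : Int :=
  let X := matrice.length
  let Y := (matrice.headD []).length
  let Z := ((matrice.headD []).headD []).length
  let visite := List.replicate X (List.replicate Y (List.replicate Z false))
  let fuel := X * Y * Z + 1   -- enough fuel: each productive call marks a fresh cell
  (((PySem.List.pyRange 0 (X : Int) 1).foldl (fun (s : List (List (List Bool)) × Int) x =>
    (PySem.List.pyRange 0 (Y : Int) 1).foldl (fun s y =>
      (PySem.List.pyRange 0 (Z : Int) 1).foldl (fun s z =>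
        if (mGet matrice x y z == 0) && !(vGet s.1 x y z) then
          (dfs matrice fuel x y z s.1, s.2 + 1)
        else s) s) s) (visite, 0)).2 : Int)

-- ===== PORT B =====
-- B's while-loop over the explicit stack; head of the list is the top of the Python `pile`
-- (Python appends the six neighbours reversed and pops from the end — same traversal order);
-- the Nat argument is fuel only, compter_poches_alt passes enough for the loop to drain the stack
def remplir (m : List (List (List Int))) :
    Nat → List (Int × Int × Int) → List (List (List Bool)) → List (List (List Bool))
  | 0, _, v => v
  | _ + 1, [], v => v
  | f + 1, (cx, cy, cz) :: pile, v =>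
    if pocheOk m v cx cy cz then
      remplir m f ([(cx + 1, cy, cz), (cx - 1, cy, cz), (cx, cy + 1, cz), (cx, cy - 1, cz),
        (cx, cy, cz + 1), (cx, cy, cz - 1)] ++ pile) (vSet v cx cy cz)
    else remplir m f pile v

def compter_poches_alt (matrice : List (List (List Int))) : Int :=
  let nx := matrice.length
  let ny := (matrice.headD []).length
  let nz := ((matrice.headD []).headD []).length
  let visite := List.replicate nx (List.replicate ny (List.replicate nz false))
  let fuel := 7 * (nx * ny * nz) + 7   -- enough fuel: ≤ 6 pushes per marked cell
  (((PySem.List.pyRange 0 (nx : Int) 1).foldl (fun (s : List (List (List Bool)) × Int) x =>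
    (PySem.List.pyRange 0 (ny : Int) 1).foldl (fun s y =>
      (PySem.List.pyRange 0 (nz : Int) 1).foldl (fun s z =>
        if (mGet matrice x y z == 0) && !(vGet s.1 x y z) then
          (remplir matrice fuel [(x, y, z)] s.1, s.2 + 1)
        else s) s) s) (visite, 0)).2 : Int)

-- ===== PRECONDITION & SPEC =====
-- Pre_ is exactly where Python A returns: either len(matrice[0][0]) = 0 (nothing is ever indexed),
-- or every plane has at least len(matrice[0]) rows and each of its first len(matrice[0]) rows has
-- at least len(matrice[0][0]) entries (otherwise an IndexError is raised while scanning).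
def Pre_compter_poches (matrice : List (List (List Int))) : Prop :=
  ((matrice.headD []).headD []).length = 0 ∨ ∀ p ∈ matrice, (matrice.headD []).length ≤ p.length ∧
    ∀ r ∈ p.take (matrice.headD []).length, ((matrice.headD []).headD []).length ≤ r.length
instance (matrice : List (List (List Int))) : Decidable (Pre_compter_poches matrice) := by
  unfold Pre_compter_poches; infer_instance

def pvWitness_compter_poches : List (List (List Int)) := [[[0, 1], [1, 0]], [[1, 1], [0, 0]]]

def Spec_compter_poches (matrice : List (List (List Int))) (out : Int) : Prop := out = compter_poches_alt matrice
instance (matrice : List (List (List Int))) (out : Int) : Decidable (Spec_compter_poches matrice out) := by unfold Spec_compter_poches; infer_instance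

-- ===== CLAIM (what is proved, stated in full; the proofs are below) =====
def Claim_equal_compter_poches : Prop := ∀ (matrice : List (List (List Int))), Dom_compter_poches matrice → Pre_compter_poches matrice → Spec_compter_poches matrice (compter_poches matrice)

-- ===== LEMMAS AND PROOFS =====

-- number of still-unvisited (false) entries: the measure every mark strictly decreases
def cF (r : List Bool) : Nat := (r.map (fun b => if b then 0 else 1)).sum
def cP (p : List (List Bool)) : Nat := (p.map cF).sum
def mu (v : List (List (List Bool))) : Nat := (v.map cP).sum

lemma sum_map_set {β : Type} (f : β → Nat) :
    ∀ (l : List β) (n : Nat) (a : β) (h : n < l.length),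
      ((l.set n a).map f).sum + f (l.get ⟨n, h⟩) = (l.map f).sum + f a := by
  intro l
  induction l with
  | nil => intro n a h; simp at h
  | cons b t ih =>
    intro n a h
    cases n with
    | zero => simp; omega
    | succ n =>
      have := ih n a (by simpa using h)
      simp only [List.set, List.map, List.sum_cons, List.get_cons_succ]
      omega

lemma vGet_false_elim {v : List (List (List Bool))} {x y z : Int}
    (hx : 0 ≤ x) (hy : 0 ≤ y) (hz : 0 ≤ z) (h : vGet v x y z = false) :
    ∃ (hx' : x.toNat < v.length) (hy' : y.toNat < (v.get ⟨x.toNat, hx'⟩).length)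
      (hz' : z.toNat < ((v.get ⟨x.toNat, hx'⟩).get ⟨y.toNat, hy'⟩).length),
      ((v.get ⟨x.toNat, hx'⟩).get ⟨y.toNat, hy'⟩).get ⟨z.toNat, hz'⟩ = false := by
  unfold vGet at h
  rcases hp : PySem.List.pyGet? v x with _ | p
  · rw [hp] at h; simp [PySem.List.pyGet?, PySem.List.pyIdx?] at h
  rw [hp] at h
  simp only [Option.getD_some] at h
  rcases hr : PySem.List.pyGet? p y with _ | r
  · rw [hr] at h; simp [PySem.List.pyGet?, PySem.List.pyIdx?] at h
  rw [hr] at h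
  simp only [Option.getD_some] at h
  rcases hb : PySem.List.pyGet? r z with _ | b
  · rw [hb] at h; simp at h
  rw [hb] at h
  simp only [Option.getD_some] at h
  subst h
  rw [PySem.List.pyGet?_of_nonneg _ hx] at hp
  rw [PySem.List.pyGet?_of_nonneg _ hy] at hr
  rw [PySem.List.pyGet?_of_nonneg _ hz] at hb
  have hx' : x.toNat < v.length := by
    by_contra hc
    rw [List.getElem?_eq_none (by omega)] at hp; simp at hp
  have hpv : p = v.get ⟨x.toNat, hx'⟩ := by
    rw [List.getElem?_eq_getElem hx'] at hp; simpa using hp.symm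
  subst hpv
  have hy' : y.toNat < (v.get ⟨x.toNat, hx'⟩).length := by
    by_contra hc
    rw [List.getElem?_eq_none (by omega)] at hr; simp at hr
  have hrv : r = (v.get ⟨x.toNat, hx'⟩).get ⟨y.toNat, hy'⟩ := by
    rw [List.getElem?_eq_getElem hy'] at hr; simpa using hr.symm
  subst hrv
  have hz' : z.toNat < ((v.get ⟨x.toNat, hx'⟩).get ⟨y.toNat, hy'⟩).length := by
    by_contra hc
    rw [List.getElem?_eq_none (by omega)] at hb; simp at hb
  refine ⟨hx', hy', hz', ?_⟩
  rw [List.getElem?_eq_getElem hz'] at hb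
  simpa using hb.symm

lemma mu_vSet {v : List (List (List Bool))} {x y z : Int}
    (hx : 0 ≤ x) (hy : 0 ≤ y) (hz : 0 ≤ z) (h : vGet v x y z = false) :
    mu (vSet v x y z) + 1 = mu v := by
  obtain ⟨hx', hy', hz', hfalse⟩ := vGet_false_elim hx hy hz h
  set p := v.get ⟨x.toNat, hx'⟩ with hp
  set r := p.get ⟨y.toNat, hy'⟩ with hr
  have hpv : (PySem.List.pyGet? v x).getD [] = p := by
    rw [PySem.List.pyGet?_of_nonneg _ hx, List.getElem?_eq_getElem hx']; simp [hp]
  have hrv : (PySem.List.pyGet? p y).getD [] = r := by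
    rw [PySem.List.pyGet?_of_nonneg _ hy, List.getElem?_eq_getElem hy']; simp [hr]
  have e3 : cF (r.set z.toNat true) + 1 = cF r := by
    have := sum_map_set (fun b => if b then 0 else 1) r z.toNat true hz'
    rw [hfalse] at this
    simpa [cF] using this
  have e2 : cP (p.set y.toNat (r.set z.toNat true)) + cF r = cP p + cF (r.set z.toNat true) := by
    have := sum_map_set cF p y.toNat (r.set z.toNat true) hy'
    rw [← hr] at this
    simpa [cP] using this
  have e1 : mu (v.set x.toNat (p.set y.toNat (r.set z.toNat true))) + cP p =
      mu v + cP (p.set y.toNat (r.set z.toNat true)) := by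
    have := sum_map_set cP v x.toNat (p.set y.toNat (r.set z.toNat true)) hx'
    rw [← hp] at this
    simpa [mu] using this
  simp only [vSet]
  rw [hpv, hrv]
  omega

lemma pocheOk_mu {m : List (List (List Int))} {v : List (List (List Bool))} {x y z : Int}
    (h : pocheOk m v x y z = true) : mu (vSet v x y z) + 1 = mu v := by
  simp only [pocheOk, Bool.and_eq_true, decide_eq_true_eq, Bool.not_eq_eq_eq_not,
    Bool.not_true, beq_iff_eq] at h
  obtain ⟨⟨⟨⟨⟨⟨⟨hA, hB⟩, hC⟩, hD⟩, hE⟩, hF⟩, hG⟩, hH⟩ := h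
  exact mu_vSet hA hC hE hG

lemma dfs_succ_pos {m : List (List (List Int))} {v : List (List (List Bool))} {x y z : Int}
    (f : Nat) (h : pocheOk m v x y z = true) :
    dfs m (f + 1) x y z v =
      dfs m f x y (z - 1) (dfs m f x y (z + 1) (dfs m f x (y - 1) z (dfs m f x (y + 1) z
        (dfs m f (x - 1) y z (dfs m f (x + 1) y z (vSet v x y z)))))) := by
  simp [dfs, h]

lemma dfs_succ_neg {m : List (List (List Int))} {v : List (List (List Bool))} {x y z : Int}
    (f : Nat) (h : pocheOk m v x y z = false) : dfs m (f + 1) x y z v = v := by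
  simp [dfs, h]

lemma mu_dfs (m : List (List (List Int))) :
    ∀ (f : Nat) (x y z : Int) (v : List (List (List Bool))), mu (dfs m f x y z v) ≤ mu v := by
  intro f
  induction f with
  | zero => intro x y z v; simp [dfs]
  | succ f ih =>
    intro x y z v
    by_cases h : pocheOk m v x y z = true
    · rw [dfs_succ_pos f h]
      have h0 := pocheOk_mu h
      calc mu (dfs m f x y (z-1) _) ≤ mu (dfs m f x y (z+1) _) := ih _ _ _ _
        _ ≤ mu (dfs m f x (y-1) z _) := ih _ _ _ _
        _ ≤ mu (dfs m f x (y+1) z _) := ih _ _ _ _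
        _ ≤ mu (dfs m f (x-1) y z _) := ih _ _ _ _
        _ ≤ mu (dfs m f (x+1) y z _) := ih _ _ _ _
        _ ≤ mu (vSet v x y z) := ih _ _ _ _
        _ ≤ mu v := by omega
    · rw [dfs_succ_neg f (by simpa using h)]

lemma dfs_fuel (m : List (List (List Int))) :
    ∀ (k f g : Nat) (x y z : Int) (v : List (List (List Bool))),
      mu v < k → mu v < f → mu v < g → dfs m f x y z v = dfs m g x y z v := by
  intro k
  induction k with
  | zero => intro f g x y z v hk; omega
  | succ k ih =>
    intro f g x y z v hk hf hg
    cases f with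
    | zero => omega
    | succ f =>
      cases g with
      | zero => omega
      | succ g =>
        by_cases h : pocheOk m v x y z = true
        · rw [dfs_succ_pos f h, dfs_succ_pos g h]
          have h0 := pocheOk_mu h
          set w0 := vSet v x y z with hw0
          have e1 : dfs m f (x+1) y z w0 = dfs m g (x+1) y z w0 :=
            ih f g _ _ _ _ (by omega) (by omega) (by omega)
          rw [e1]
          set w1 := dfs m g (x+1) y z w0 with hw1
          have n1 : mu w1 ≤ mu w0 := mu_dfs m g _ _ _ _
          have e2 : dfs m f (x-1) y z w1 = dfs m g (x-1) y z w1 :=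
            ih f g _ _ _ _ (by omega) (by omega) (by omega)
          rw [e2]
          set w2 := dfs m g (x-1) y z w1 with hw2
          have n2 : mu w2 ≤ mu w1 := mu_dfs m g _ _ _ _
          have e3 : dfs m f x (y+1) z w2 = dfs m g x (y+1) z w2 :=
            ih f g _ _ _ _ (by omega) (by omega) (by omega)
          rw [e3]
          set w3 := dfs m g x (y+1) z w2 with hw3
          have n3 : mu w3 ≤ mu w2 := mu_dfs m g _ _ _ _
          have e4 : dfs m f x (y-1) z w3 = dfs m g x (y-1) z w3 :=
            ih f g _ _ _ _ (by omega) (by omega) (by omega)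
          rw [e4]
          set w4 := dfs m g x (y-1) z w3 with hw4
          have n4 : mu w4 ≤ mu w3 := mu_dfs m g _ _ _ _
          have e5 : dfs m f x y (z+1) w4 = dfs m g x y (z+1) w4 :=
            ih f g _ _ _ _ (by omega) (by omega) (by omega)
          rw [e5]
          set w5 := dfs m g x y (z+1) w4 with hw5
          have n5 : mu w5 ≤ mu w4 := mu_dfs m g _ _ _ _
          exact ih f g _ _ _ _ (by omega) (by omega) (by omega)
        · rw [dfs_succ_neg f (by simpa using h), dfs_succ_neg g (by simpa using h)]

-- the canonical (fuel-independent) dfs step, and its fold over a worklist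
def dfsStep (m : List (List (List Int))) (v : List (List (List Bool))) (c : Int × Int × Int) :
    List (List (List Bool)) :=
  dfs m (mu v + 1) c.1 c.2.1 c.2.2 v

lemma mu_dfsStep (m : List (List (List Int))) (v : List (List (List Bool)))
    (c : Int × Int × Int) : mu (dfsStep m v c) ≤ mu v :=
  mu_dfs m _ _ _ _ _

lemma mu_foldl_dfsStep (m : List (List (List Int))) :
    ∀ (s : List (Int × Int × Int)) (v : List (List (List Bool))),
      mu (s.foldl (dfsStep m) v) ≤ mu v := by
  intro s
  induction s with
  | nil => intro v; simp
  | cons c s' ih =>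
    intro v
    simp only [List.foldl_cons]
    exact le_trans (ih (dfsStep m v c)) (mu_dfsStep m v c)

lemma dfsStep_neg {m : List (List (List Int))} {v : List (List (List Bool))} {x y z : Int}
    (h : pocheOk m v x y z = false) : dfsStep m v (x, y, z) = v := by
  exact dfs_succ_neg (mu v) h

lemma dfsStep_pos {m : List (List (List Int))} {v : List (List (List Bool))} {x y z : Int}
    (h : pocheOk m v x y z = true) :
    dfsStep m v (x, y, z) =
      [((x:Int) + 1, y, z), (x - 1, y, z), (x, y + 1, z), (x, y - 1, z),
        (x, y, z + 1), (x, y, z - 1)].foldl (dfsStep m) (vSet v x y z) := by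
  have h0 := pocheOk_mu h
  show dfs m (mu v + 1) x y z v = _
  rw [dfs_succ_pos (mu v) h]
  simp only [List.foldl_cons, List.foldl_nil]
  set w0 := vSet v x y z with hw0
  have e1 : dfs m (mu v) (x+1) y z w0 = dfsStep m w0 (x+1, y, z) :=
    dfs_fuel m (mu v + 1) _ _ _ _ _ _ (by omega) (by omega) (by omega)
  rw [e1]
  set w1 := dfsStep m w0 (x+1, y, z) with hw1
  have n1 : mu w1 ≤ mu w0 := mu_dfsStep m _ _
  have e2 : dfs m (mu v) (x-1) y z w1 = dfsStep m w1 (x-1, y, z) :=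
    dfs_fuel m (mu v + 1) _ _ _ _ _ _ (by omega) (by omega) (by omega)
  rw [e2]
  set w2 := dfsStep m w1 (x-1, y, z) with hw2
  have n2 : mu w2 ≤ mu w1 := mu_dfsStep m _ _
  have e3 : dfs m (mu v) x (y+1) z w2 = dfsStep m w2 (x, y+1, z) :=
    dfs_fuel m (mu v + 1) _ _ _ _ _ _ (by omega) (by omega) (by omega)
  rw [e3]
  set w3 := dfsStep m w2 (x, y+1, z) with hw3
  have n3 : mu w3 ≤ mu w2 := mu_dfsStep m _ _
  have e4 : dfs m (mu v) x (y-1) z w3 = dfsStep m w3 (x, y-1, z) :=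
    dfs_fuel m (mu v + 1) _ _ _ _ _ _ (by omega) (by omega) (by omega)
  rw [e4]
  set w4 := dfsStep m w3 (x, y-1, z) with hw4
  have n4 : mu w4 ≤ mu w3 := mu_dfsStep m _ _
  have e5 : dfs m (mu v) x y (z+1) w4 = dfsStep m w4 (x, y, z+1) :=
    dfs_fuel m (mu v + 1) _ _ _ _ _ _ (by omega) (by omega) (by omega)
  rw [e5]
  set w5 := dfsStep m w4 (x, y, z+1) with hw5
  have n5 : mu w5 ≤ mu w4 := mu_dfsStep m _ _
  exact dfs_fuel m (mu v + 1) _ _ _ _ _ _ (by omega) (by omega) (by omega)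

lemma remplir_nil (m : List (List (List Int))) (f : Nat) (v : List (List (List Bool))) :
    remplir m f [] v = v := by
  cases f <;> rfl

lemma remplir_cons_pos {m : List (List (List Int))} {v : List (List (List Bool))} {x y z : Int}
    (f : Nat) (pile : List (Int × Int × Int)) (h : pocheOk m v x y z = true) :
    remplir m (f + 1) ((x, y, z) :: pile) v =
      remplir m f ([(x + 1, y, z), (x - 1, y, z), (x, y + 1, z), (x, y - 1, z),
        (x, y, z + 1), (x, y, z - 1)] ++ pile) (vSet v x y z) := by
  simp [remplir, h]

lemma remplir_cons_neg {m : List (List (List Int))} {v : List (List (List Bool))} {x y z : Int}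
    (f : Nat) (pile : List (Int × Int × Int)) (h : pocheOk m v x y z = false) :
    remplir m (f + 1) ((x, y, z) :: pile) v = remplir m f pile v := by
  simp [remplir, h]

lemma remplir_fuel (m : List (List (List Int))) :
    ∀ (k : Nat) (s : List (Int × Int × Int)) (v : List (List (List Bool))) (f g : Nat),
      mu v < k → s.length + 7 * mu v < f → s.length + 7 * mu v < g →
      remplir m f s v = remplir m g s v := by
  intro k
  induction k with
  | zero => intro s v f g hk; omega
  | succ k ihk =>
    intro s
    induction s with
    | nil => intro v f g _ _ _; rw [remplir_nil, remplir_nil]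
    | cons c s' ihs =>
      intro v f g hk hf hg
      obtain ⟨x, y, z⟩ := c
      simp only [List.length_cons] at hf hg
      cases f with
      | zero => omega
      | succ f =>
        cases g with
        | zero => omega
        | succ g =>
          by_cases h : pocheOk m v x y z = true
          · rw [remplir_cons_pos f s' h, remplir_cons_pos g s' h]
            have h0 := pocheOk_mu h
            exact ihk _ _ _ _ (by omega)
              (by simp only [List.length_append, List.length_cons, List.length_nil]; omega)
              (by simp only [List.length_append, List.length_cons, List.length_nil]; omega)
          · rw [remplir_cons_neg f s' (by simpa using h), remplir_cons_neg g s' (by simpa using h)]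
            exact ihs _ _ _ (by omega) (by omega) (by omega)

lemma remplir_sim (m : List (List (List Int))) :
    ∀ (k : Nat) (s rest : List (Int × Int × Int)) (v : List (List (List Bool))) (f g : Nat),
      mu v < k → (s ++ rest).length + 7 * mu v < f →
      rest.length + 7 * mu (s.foldl (dfsStep m) v) < g →
      remplir m f (s ++ rest) v = remplir m g rest (s.foldl (dfsStep m) v) := by
  intro k
  induction k with
  | zero => intro s rest v f g hk; omega
  | succ k ihk =>
    intro s
    induction s with
    | nil =>
      intro rest v f g hk hf hg
      simp only [List.nil_append] at hf ⊢
      simp only [List.foldl_nil] at hg ⊢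
      exact remplir_fuel m (k + 1) rest v f g hk hf hg
    | cons c s' ihs =>
      intro rest v f g hk hf hg
      obtain ⟨x, y, z⟩ := c
      simp only [List.cons_append, List.length_cons, List.length_append] at hf hg ⊢
      cases f with
      | zero => omega
      | succ f =>
        by_cases h : pocheOk m v x y z = true
        · have h0 := pocheOk_mu h
          rw [remplir_cons_pos f (s' ++ rest) h]
          set w0 := vSet v x y z with hw0
          set L6 : List (Int × Int × Int) := [(x + 1, y, z), (x - 1, y, z), (x, y + 1, z),
            (x, y - 1, z), (x, y, z + 1), (x, y, z - 1)] with hL6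
          set w := L6.foldl (dfsStep m) w0 with hw
          have nw : mu w ≤ mu w0 := mu_foldl_dfsStep m _ _
          have step1 : remplir m f (L6 ++ (s' ++ rest)) w0 =
              remplir m ((s' ++ rest).length + 7 * mu w + 1) (s' ++ rest) w :=
            ihk L6 (s' ++ rest) w0 f _ (by omega)
              (by simp only [hL6, List.length_append, List.length_cons, List.length_nil]; omega)
              (by rw [← hw]; simp only [List.length_append]; omega)
          rw [step1]
          have hstep : dfsStep m v (x, y, z) = w := by rw [hw, hw0, hL6]; exact dfsStep_pos h
          have step2 : remplir m ((s' ++ rest).length + 7 * mu w + 1) (s' ++ rest) w =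
              remplir m g rest (s'.foldl (dfsStep m) w) :=
            ihk s' rest w _ g (by omega)
              (by simp only [List.length_append]; omega)
              (by simp only [List.foldl_cons, hstep] at hg; omega)
          rw [step2]
          simp only [List.foldl_cons, hstep]
        · rw [remplir_cons_neg f (s' ++ rest) (by simpa using h)]
          have e : dfsStep m v (x, y, z) = v := dfsStep_neg (by simpa using h)
          simp only [List.foldl_cons, e] at hg ⊢
          have := ihs rest v f g (by omega) (by simp only [List.length_append]; omega) (by omega)
          simpa using this

lemma dfs_eq_remplir (m : List (List (List Int))) (N : Nat) (x y z : Int)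
    (v : List (List (List Bool))) (hN : mu v ≤ N) :
    dfs m (N + 1) x y z v = remplir m (7 * N + 7) [(x, y, z)] v := by
  have e1 : dfs m (N + 1) x y z v = dfsStep m v (x, y, z) :=
    dfs_fuel m (mu v + 1) _ _ _ _ _ _ (by omega) (by omega) (by omega)
  have e2 := remplir_sim m (mu v + 1) [(x, y, z)] [] v (7 * N + 7)
    (0 + 7 * mu ([(x, y, z)].foldl (dfsStep m) v) + 1) (by omega)
    (by simp only [List.length_append, List.length_cons, List.length_nil]; omega)
    (by simp only [List.length_nil]; omega)
  simp only [List.append_nil] at e2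
  rw [e1, e2, remplir_nil]
  simp only [List.foldl_cons, List.foldl_nil]

lemma foldl_congr_inv {α σ : Type} (P : σ → Prop) (f g : σ → α → σ)
    (h : ∀ s a, P s → f s a = g s a ∧ P (f s a)) :
    ∀ (l : List α) (s : σ), P s → l.foldl f s = l.foldl g s ∧ P (l.foldl f s) := by
  intro l
  induction l with
  | nil => intro s hs; exact ⟨rfl, hs⟩
  | cons a l ih =>
    intro s hs
    obtain ⟨hfg, hPf⟩ := h s a hs
    simp only [List.foldl_cons]
    rw [← hfg]
    exact ih (f s a) hPf

lemma mu_replicate (X Y Z : Nat) :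
    mu (List.replicate X (List.replicate Y (List.replicate Z false))) = X * Y * Z := by
  simp [mu, cP, cF, List.map_replicate, List.sum_replicate, smul_eq_mul]
  ring

-- ===== VERDICT (by name: the statement is the Claim_ definition above) =====
theorem compter_poches_spec : Claim_equal_compter_poches := by
  unfold Claim_equal_compter_poches
  intro matrice _ _
  unfold Spec_compter_poches
  simp only [compter_poches, compter_poches_alt]
  set X := matrice.length with hX
  set Y := (matrice.headD []).length with hY
  set Z := ((matrice.headD []).headD []).length with hZ
  set N := X * Y * Z with hN
  set v0 := List.replicate X (List.replicate Y (List.replicate Z false)) with hv0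
  have hinit : mu v0 ≤ N := le_of_eq (mu_replicate X Y Z)
  have main := foldl_congr_inv (fun (s : List (List (List Bool)) × Int) => mu s.1 ≤ N)
    (fun s x => (PySem.List.pyRange 0 (Y : Int) 1).foldl (fun s y =>
      (PySem.List.pyRange 0 (Z : Int) 1).foldl (fun s z =>
        if (mGet matrice x y z == 0) && !(vGet s.1 x y z) then
          (dfs matrice (N + 1) x y z s.1, s.2 + 1)
        else s) s) s)
    (fun s x => (PySem.List.pyRange 0 (Y : Int) 1).foldl (fun s y =>
      (PySem.List.pyRange 0 (Z : Int) 1).foldl (fun s z =>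
        if (mGet matrice x y z == 0) && !(vGet s.1 x y z) then
          (remplir matrice (7 * N + 7) [(x, y, z)] s.1, s.2 + 1)
        else s) s) s)
    ?_ (PySem.List.pyRange 0 (X : Int) 1) (v0, 0) hinit
  · rw [main.1]
  · intro s x hs
    refine foldl_congr_inv (fun (s : List (List (List Bool)) × Int) => mu s.1 ≤ N) _ _ ?_
      (PySem.List.pyRange 0 (Y : Int) 1) s hs
    intro s y hs
    refine foldl_congr_inv (fun (s : List (List (List Bool)) × Int) => mu s.1 ≤ N) _ _ ?_
      (PySem.List.pyRange 0 (Z : Int) 1) s hs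
    intro s z hs
    by_cases hc : ((mGet matrice x y z == 0) && !(vGet s.1 x y z)) = true
    · simp only [hc, if_true]
      refine ⟨?_, ?_⟩
      · exact congrArg (fun w => (w, s.2 + 1)) (dfs_eq_remplir matrice N x y z s.1 hs)
      · exact le_trans (mu_dfs matrice (N + 1) x y z s.1) hs
    · simp only [Bool.not_eq_true] at hc
      simp only [hc]
      exact ⟨rfl, hs⟩
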